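-- pv_equiv track=rewrite | github.com/WeeklyProjects/8puzzle | EightPuzzle.py | check_valid_puzzle
-- ===== SOURCE A (Python) =====
-- def check_valid_puzzle(puzzle):
--     possible = []
--     if len(puzzle) != 9:
--         return False
--     for p in puzzle:
--         if p < 0 or p > 8:
--             return False
--         if p not in possible:
--             possible.append(p)
--         else:
--             return False
--
--     return True
-- ===== SOURCE B (Python) =====
-- def check_valid_puzzle(puzzle):
--     if len(puzzle) != 9:
--         return False
--     return sorted(puzzle) == list(range(9))
-- ===== Notes on version B (the rewrite author's own statement) =====
-- stated objective: simpler
-- what changed: Replaces the element-by-element scan with a growing membership list by a single canonical-form comparison: sorted(puzzle) == list(range(9)).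
import Mathlib
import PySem

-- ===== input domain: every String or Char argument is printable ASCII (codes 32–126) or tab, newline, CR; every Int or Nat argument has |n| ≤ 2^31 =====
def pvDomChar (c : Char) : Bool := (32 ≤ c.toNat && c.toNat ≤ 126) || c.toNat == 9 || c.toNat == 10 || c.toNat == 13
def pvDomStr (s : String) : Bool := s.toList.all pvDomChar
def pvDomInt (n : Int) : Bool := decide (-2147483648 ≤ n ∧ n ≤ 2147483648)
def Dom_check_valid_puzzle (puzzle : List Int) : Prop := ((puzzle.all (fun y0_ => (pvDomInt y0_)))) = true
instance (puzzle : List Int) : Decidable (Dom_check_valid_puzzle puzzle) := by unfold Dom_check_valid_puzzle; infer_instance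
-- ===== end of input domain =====

-- B replaces A's scan with a growing membership list by one canonical-form comparison
-- sorted(puzzle) == list(range(9)) — simpler, same result.


-- ===== PORT A =====
-- the 'for p in puzzle' loop with accumulator 'possible'
def checkLoopA : List Int → List Int → Bool
  | _, [] => true
  | possible, p :: rest =>
    if p < 0 || p > 8 then false
    else if !(possible.contains p) then checkLoopA (possible ++ [p]) rest
    else false

def check_valid_puzzle (puzzle : List Int) : Bool :=
  if puzzle.length ≠ 9 then false
  else checkLoopA [] puzzle

-- ===== PORT B =====
def check_valid_puzzle_alt (puzzle : List Int) : Bool :=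
  if puzzle.length ≠ 9 then false
  else PySem.List.sorted puzzle (fun x => x) false == PySem.List.pyRange 0 9 1

-- ===== PRECONDITION & SPEC =====
def Spec_check_valid_puzzle (puzzle : List Int) (out : Bool) : Prop := out = check_valid_puzzle_alt puzzle
instance (puzzle : List Int) (out : Bool) : Decidable (Spec_check_valid_puzzle puzzle out) := by unfold Spec_check_valid_puzzle; infer_instance

-- ===== CLAIM (what is proved, stated in full; the proofs are below) =====
def Claim_equal_check_valid_puzzle : Prop := ∀ (puzzle : List Int), Dom_check_valid_puzzle puzzle → Spec_check_valid_puzzle puzzle (check_valid_puzzle puzzle)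

-- ===== LEMMAS AND PROOFS =====

-- characterisation of A's loop
lemma checkLoopA_iff (rest possible : List Int) :
    checkLoopA possible rest = true ↔
      (∀ p ∈ rest, 0 ≤ p ∧ p ≤ 8) ∧ rest.Nodup ∧ ∀ p ∈ rest, p ∉ possible := by
  induction rest generalizing possible with
  | nil => simp [checkLoopA]
  | cons p rest ih =>
    simp only [checkLoopA]
    by_cases hb : p < 0 ∨ p > 8
    · have : (decide (p < 0) || decide (p > 8)) = true := by
        rcases hb with h | h <;> simp [h]
      simp only [this, if_true]
      constructor
      · intro h; exact absurd h (by simp)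
      · rintro ⟨hall, -, -⟩
        have := hall p (by simp)
        omega
    · rw [not_or] at hb
      simp only [not_lt] at hb
      have hbd : (decide (p < 0) || decide (p > 8)) = false := by
        simp; omega
      simp only [hbd, Bool.false_eq_true, if_false]
      by_cases hm : possible.contains p
      · have hpm : p ∈ possible := by simpa using hm
        simp only [hm, Bool.not_true, Bool.false_eq_true, if_false]
        constructor
        · intro h; exact absurd h (by simp)
        · rintro ⟨-, -, hno⟩
          exact absurd hpm (hno p (by simp))
      · have hpm : p ∉ possible := by simpa using hm
        simp only [Bool.not_eq_true] at hm
        simp only [hm, Bool.not_false, if_true, ih]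
        constructor
        · rintro ⟨hall, hnd, hno⟩
          refine ⟨?_, ?_, ?_⟩
          · intro q hq
            rcases List.mem_cons.mp hq with rfl | hq
            · exact ⟨by omega, by omega⟩
            · exact hall q hq
          · refine List.nodup_cons.mpr ⟨?_, hnd⟩
            intro hp
            have := hno p hp
            simp at this
          · intro q hq
            rcases List.mem_cons.mp hq with rfl | hq
            · exact hpm
            · intro hqp
              have := hno q hq
              simp [hqp] at this
        · rintro ⟨hall, hnd, hno⟩
          have hnd' := List.nodup_cons.mp hnd
          refine ⟨fun q hq => hall q (by simp [hq]), hnd'.2, ?_⟩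
          intro q hq
          have := hno q (by simp [hq])
          intro hmem
          rcases List.mem_append.mp hmem with h | h
          · exact this h
          · simp at h
            subst h
            exact hnd'.1 hq

-- B's test is the permutation test
lemma alt_sorted_iff (puzzle : List Int) :
    (PySem.List.sorted puzzle (fun x => x) false = PySem.List.pyRange 0 9 1) ↔
      puzzle.Perm (PySem.List.pyRange 0 9 1) := by
  constructor
  · intro h
    have := PySem.List.sorted_perm (xs := puzzle) (key := fun x => x) (rev := false)
    rw [h] at this
    exact this.symm
  · intro h
    apply PySem.List.sorted_eq_of_perm_of_pairwise_lt
    · exact h.symm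
    · decide

lemma perm_range_iff (puzzle : List Int) (hlen : puzzle.length = 9) :
    puzzle.Perm (PySem.List.pyRange 0 9 1) ↔
      (∀ p ∈ puzzle, 0 ≤ p ∧ p ≤ 8) ∧ puzzle.Nodup := by
  have hR : PySem.List.pyRange 0 9 1 = [0, 1, 2, 3, 4, 5, 6, 7, 8] := by decide
  constructor
  · intro h
    refine ⟨?_, ?_⟩
    · intro p hp
      have := h.mem_iff.mp hp
      rw [hR] at this
      simp at this
      omega
    · exact h.nodup_iff.mpr (by rw [hR]; decide)
  · rintro ⟨hall, hnd⟩
    have hsub : puzzle ⊆ PySem.List.pyRange 0 9 1 := by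
      intro p hp
      have := hall p hp
      rw [hR]
      simp
      omega
    have hsp : puzzle.Subperm (PySem.List.pyRange 0 9 1) := hnd.subperm hsub
    exact hsp.perm_of_length_le (by rw [hR, hlen]; decide)

-- ===== VERDICT (by name: the statement is the Claim_ definition above) =====
theorem check_valid_puzzle_spec : Claim_equal_check_valid_puzzle := by
  unfold Claim_equal_check_valid_puzzle
  intro puzzle _
  unfold Spec_check_valid_puzzle check_valid_puzzle check_valid_puzzle_alt
  by_cases hlen : puzzle.length = 9
  · simp only [hlen, ne_eq, not_true_eq_false, if_false]
    have h1 := checkLoopA_iff puzzle []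
    have h2 := (alt_sorted_iff puzzle).trans (perm_range_iff puzzle hlen)
    by_cases hv : (∀ p ∈ puzzle, 0 ≤ p ∧ p ≤ 8) ∧ puzzle.Nodup
    · have hA : checkLoopA [] puzzle = true := h1.mpr ⟨hv.1, hv.2, by simp⟩
      have hB : PySem.List.sorted puzzle (fun x => x) false = PySem.List.pyRange 0 9 1 :=
        h2.mpr hv
      simp [hA, hB]
    · have hA : checkLoopA [] puzzle ≠ true := by
        intro h
        exact hv ⟨(h1.mp h).1, (h1.mp h).2.1⟩
      have hB : PySem.List.sorted puzzle (fun x => x) false ≠ PySem.List.pyRange 0 9 1 := by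
        intro h
        exact hv (h2.mp h)
      have hA' : checkLoopA [] puzzle = false := Bool.eq_false_iff.mpr hA
      simp [hA', hB]
  · simp [hlen]
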